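-- pv_equiv track=rewrite | github.com/achibulup/ComparativeOpinionMining | processing.py | mapToOriginalIndex
-- ===== SOURCE A (Python) =====
-- def mapToOriginalIndex(index: tuple[int, int], original: list[str], tokenized: list[str]) -> tuple[int, int]:
--   if index == (-1, -1):
--     return index
--   original_index = 0
--   tokenized_index = 0
--   cur_token_match_len = 0
--
--   while tokenized_index < index[0]:
--     cur_token_match_len += len(original[original_index])
--     if cur_token_match_len == len(tokenized[tokenized_index]):
--       cur_token_match_len = 0
--       tokenized_index += 1
--     else :
--       cur_token_match_len += 1 # account for '_' character
--     original_index += 1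
--   begin = original_index
--
--   while tokenized_index < index[1]: # do the same thing
--     cur_token_match_len += len(original[original_index])
--     if cur_token_match_len == len(tokenized[tokenized_index]):
--       cur_token_match_len = 0
--       tokenized_index += 1
--     else :
--       cur_token_match_len += 1 # account for '_' character
--     original_index += 1
--   end = original_index
--
--   return (begin, end)
-- ===== SOURCE B (Python) =====
-- def mapToOriginalIndex(index: tuple[int, int], original: list[str], tokenized: list[str]) -> tuple[int, int]:
--   if index == (-1, -1):
--     return index
--   # position in the '_'-joined original string -> index of the original token starting there
--   pos = {0: 0}
--   total = 0
--   for i, w in enumerate(original):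
--     total += len(w) + 1
--     pos[total] = i + 1
--   def cut(t):
--     return pos[sum(len(w) + 1 for w in tokenized[:t])]
--   return (cut(index[0]), cut(index[1]))
-- ===== Notes on version B (the rewrite author's own statement) =====
-- stated objective: simpler
-- what changed: B replaces A's stateful double while-loop simulation by precomputing a dictionary from every '_'-joined prefix position of original to its token index and answering both endpoints independently with direct lookups; Pre_ restricts to the function's natural domain - the (-1,-1) sentinel or indices whose endpoints each denote a prefix of tokenized (0, an ordered in-range positive pair, or an endpoint at or below -len(tokenized), i.e. …
-- outside the precondition, e.g. on mapToOriginalIndex((-1, 1), ['a', 'b'], ['a', 'b']): A returns (0, 1), B returns (1, 1); on mapToOriginalIndex((1, 0), ['a', 'b'], ['a', 'b']): A returns (1, 1), B returns (1, 0)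
import Mathlib
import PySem

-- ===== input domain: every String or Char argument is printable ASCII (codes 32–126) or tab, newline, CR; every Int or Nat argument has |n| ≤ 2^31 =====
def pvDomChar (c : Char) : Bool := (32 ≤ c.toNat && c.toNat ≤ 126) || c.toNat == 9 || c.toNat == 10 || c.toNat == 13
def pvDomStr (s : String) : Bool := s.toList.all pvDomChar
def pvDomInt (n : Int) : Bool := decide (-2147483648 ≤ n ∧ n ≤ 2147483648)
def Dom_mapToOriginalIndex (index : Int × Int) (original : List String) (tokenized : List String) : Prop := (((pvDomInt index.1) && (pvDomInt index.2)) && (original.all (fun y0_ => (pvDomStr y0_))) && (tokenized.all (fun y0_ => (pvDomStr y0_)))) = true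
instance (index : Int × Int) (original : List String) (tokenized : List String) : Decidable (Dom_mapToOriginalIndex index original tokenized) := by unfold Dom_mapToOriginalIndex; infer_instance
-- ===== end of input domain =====

-- B replaces A's stateful double while-loop by one precomputed boundary-position dictionary plus
-- two independent lookups (same asymptotic cost; simpler decomposition).

-- ===== PORT A =====
-- the shared body of A's two while-loops: state (original_index, tokenized_index, cur_token_match_len);
-- none = IndexError (the loop only ever stops via ti reaching target or an out-of-range access)
def pvLoopA (original tokenized : List String) (target : Int) (oi ti cur : Nat) : Option (Nat × Nat × Nat) :=
  if (ti : Int) < target then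
    match h1 : PySem.List.pyGet? original (oi : Int), PySem.List.pyGet? tokenized (ti : Int) with
    | some ow, some tw =>
      if cur + ow.length = tw.length then
        pvLoopA original tokenized target (oi + 1) (ti + 1) 0
      else
        pvLoopA original tokenized target (oi + 1) ti (cur + ow.length + 1)
    | _, _ => none
  else
    some (oi, ti, cur)
termination_by original.length - oi
decreasing_by
  all_goals
    simp only [PySem.List.pyGet?_natCast] at h1
    obtain ⟨h, -⟩ := List.getElem?_eq_some_iff.mp h1
    omega

def mapToOriginalIndex (index : Int × Int) (original : List String) (tokenized : List String) : Int × Int :=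
  if index = (-1, -1) then index
  else
    match pvLoopA original tokenized index.1 0 0 0 with
    | none => (0, 0)          -- IndexError in the first loop (excluded by Pre_)
    | some (oi1, ti1, cur1) =>
      match pvLoopA original tokenized index.2 oi1 ti1 cur1 with
      | none => (0, 0)        -- IndexError in the second loop (excluded by Pre_)
      | some (oi2, _, _) => ((oi1 : Int), (oi2 : Int))

-- ===== PORT B =====
-- pos : position in '_'.join(original) → index of the original token starting there (Source B's loop)
def pvPosDict (original : List String) : Int × PySem.Dict Int Int :=
  (PySem.List.enumerate original).foldl
    (fun (st : Int × PySem.Dict Int Int) p =>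
      (st.1 + (p.2.length : Int) + 1, st.2.insert (st.1 + (p.2.length : Int) + 1) (p.1 + 1)))
    (0, PySem.Dict.ofList [((0 : Int), (0 : Int))])

-- Source B's cut(t): dict lookup at the joined length of tokenized[:t]; none = KeyError
def pvCutB (pos : PySem.Dict Int Int) (tokenized : List String) (t : Int) : Option Int :=
  pos.get? (((PySem.List.slice tokenized none (some t)).map (fun w => (w.length : Int) + 1)).sum)

def mapToOriginalIndex_alt (index : Int × Int) (original : List String) (tokenized : List String) : Int × Int :=
  if index = (-1, -1) then index
  else
    let pos := (pvPosDict original).2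
    match pvCutB pos tokenized index.1, pvCutB pos tokenized index.2 with
    | some b, some e => (b, e)
    | _, _ => (0, 0)          -- KeyError (excluded by Pre_)

-- ===== PRECONDITION & SPEC =====
-- pvPS l c = length of '_'.join(l[:c]) plus one trailing separator slot = Σ_{j<c} (len l[j] + 1)
def pvPS (l : List String) (c : Nat) : Nat := ((l.take c).map (fun s => s.length + 1)).sum

-- Pre_ restricts to the function's natural domain: the (-1,-1) sentinel, or indices whose endpoints
-- each denote a prefix of tokenized — 0, an in-range ordered positive pair lo ≤ hi ≤ len(tokenized),
-- or an endpoint at or below -len(tokenized) (the empty prefix) — with every tokenized prefix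
-- boundary up to hi landing on a '_'-joined prefix boundary of original; it excludes reversed ranges
-- and small negative endpoints, corners on which A's values are artefacts of while-loops that do not
-- run, and inputs on which A raises IndexError (misaligned tokenization or a range past tokenized).
def Pre_mapToOriginalIndex (index : Int × Int) (original : List String) (tokenized : List String) : Prop :=
  index = (-1, -1) ∨
  ((index.1 = 0 ∨ index.1 + tokenized.length ≤ 0 ∨ (0 < index.1 ∧ index.1 ≤ index.2)) ∧
   (index.2 = 0 ∨ index.2 + tokenized.length ≤ 0 ∨ 0 < index.2) ∧
   index.2.toNat ≤ tokenized.length ∧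
   ∀ t ≤ index.2.toNat,
     ∃ c ≤ original.length, pvPS original c = pvPS tokenized t)

instance (index : Int × Int) (original : List String) (tokenized : List String) : Decidable (Pre_mapToOriginalIndex index original tokenized) := by unfold Pre_mapToOriginalIndex; infer_instance

def pvWitness_mapToOriginalIndex : (Int × Int) × List String × List String :=
  ((0, 1), (["ab", "c"], ["ab_c"]))

def Spec_mapToOriginalIndex (index : Int × Int) (original : List String) (tokenized : List String) (out : Int × Int) : Prop := out = mapToOriginalIndex_alt index original tokenized
instance (index : Int × Int) (original : List String) (tokenized : List String) (out : Int × Int) : Decidable (Spec_mapToOriginalIndex index original tokenized out) := by unfold Spec_mapToOriginalIndex; infer_instance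

-- ===== CLAIM (what is proved, stated in full; the proofs are below) =====
def Claim_equal_mapToOriginalIndex : Prop := ∀ (index : Int × Int) (original : List String) (tokenized : List String), Dom_mapToOriginalIndex index original tokenized → Pre_mapToOriginalIndex index original tokenized → Spec_mapToOriginalIndex index original tokenized (mapToOriginalIndex index original tokenized)

-- ===== LEMMAS AND PROOFS =====

theorem pvPS_succ (l : List String) (c : Nat) (h : c < l.length) :
    pvPS l (c + 1) = pvPS l c + (l[c].length + 1) := by
  unfold pvPS
  rw [List.map_take, List.map_take, List.sum_take_succ _ _ (by simpa using h)]
  simp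

theorem pvPS_le_succ (l : List String) (c : Nat) : pvPS l c ≤ pvPS l (c + 1) := by
  by_cases h : c < l.length
  · rw [pvPS_succ l c h]; omega
  · have : l.take (c + 1) = l.take c := by
      rw [List.take_of_length_le (by omega), List.take_of_length_le (by omega)]
    simp [pvPS, this]

theorem pvPS_mono (l : List String) {c c' : Nat} (h : c ≤ c') : pvPS l c ≤ pvPS l c' := by
  induction c' with
  | zero => simp_all
  | succ k ih =>
    rcases Nat.lt_or_ge c (k + 1) with hk | hk
    · exact le_trans (ih (by omega)) (pvPS_le_succ l k)
    · have : c = k + 1 := by omega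
      simp [this]

theorem pvPS_strict (l : List String) {c c' : Nat} (h : c < c') (h' : c' ≤ l.length) :
    pvPS l c < pvPS l c' := by
  have h1 : pvPS l (c + 1) = pvPS l c + (l[c].length + 1) := pvPS_succ l c (by omega)
  have h2 : pvPS l (c + 1) ≤ pvPS l c' := pvPS_mono l (by omega)
  omega

theorem pvPS_inj (l : List String) {c c' : Nat} (hc : c ≤ l.length) (hc' : c' ≤ l.length)
    (h : pvPS l c = pvPS l c') : c = c' := by
  rcases Nat.lt_trichotomy c c' with hlt | heq | hgt
  · have := pvPS_strict l hlt hc'; omega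
  · exact heq
  · have := pvPS_strict l hgt hc; omega

-- the main loop invariant: from a state on a group boundary relation, pvLoopA runs to the target
theorem pvLoopA_spec (original tokenized : List String) (target : Int) (T : Nat)
    (hTt : target ≤ (T : Int)) (hTm : T ≤ tokenized.length)
    (hex : ∀ t ≤ T, ∃ c ≤ original.length, pvPS original c = pvPS tokenized t) :
    ∀ k oi ti cur, original.length - oi ≤ k →
      ti ≤ T →
      pvPS tokenized ti + cur = pvPS original oi →
      oi ≤ original.length →
      ((ti : Int) < target ∨ cur = 0) →
      ((ti : Int) < target → pvPS original oi < pvPS tokenized (ti + 1)) →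
      ∃ oi', pvLoopA original tokenized target oi ti cur =
          some (oi', (if (ti : Int) < target then target.toNat else ti), 0) ∧
        oi' ≤ original.length ∧
        pvPS original oi' = pvPS tokenized (if (ti : Int) < target then target.toNat else ti) := by
  intro k
  induction k with
  | zero =>
    intro oi ti cur hk hti hinv hoi hcur hnext
    by_cases hlt : (ti : Int) < target
    · -- impossible: a step is needed but there is room to take one, contradiction with fuel 0
      exfalso
      have htiT : ti < T := by omega
      obtain ⟨c, hc, hPc⟩ := hex (ti + 1) (by omega)
      have hoc : pvPS original oi < pvPS original c := by
        rw [hPc]; exact hnext hlt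
      have : oi < c := by
        by_contra hge
        have := pvPS_mono original (show c ≤ oi by omega)
        omega
      omega
    · refine ⟨oi, ?_, hoi, ?_⟩
      · rw [pvLoopA, if_neg hlt]
        have hcur0 : cur = 0 := by tauto
        simp [hlt, hcur0]
      · simp only [if_neg hlt]; omega
  | succ k ih =>
    intro oi ti cur hk hti hinv hoi hcur hnext
    by_cases hlt : (ti : Int) < target
    · have htiT : ti < T := by omega
      obtain ⟨c, hc, hPc⟩ := hex (ti + 1) (by omega)
      have hoc : oi < c := by
        have h1 : pvPS original oi < pvPS original c := by rw [hPc]; exact hnext hlt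
        by_contra hge
        have := pvPS_mono original (show c ≤ oi by omega)
        omega
      have hoilen : oi < original.length := by omega
      have htilen : ti < tokenized.length := by omega
      have hg1 : PySem.List.pyGet? original (oi : Int) = some original[oi] := by
        simp [PySem.List.pyGet?_natCast, List.getElem?_eq_getElem hoilen]
      have hg2 : PySem.List.pyGet? tokenized (ti : Int) = some tokenized[ti] := by
        simp [PySem.List.pyGet?_natCast, List.getElem?_eq_getElem htilen]
      have hPsucc : pvPS original (oi + 1) = pvPS original oi + (original[oi].length + 1) :=
        pvPS_succ original oi hoilen
      have hQsucc : pvPS tokenized (ti + 1) = pvPS tokenized ti + (tokenized[ti].length + 1) :=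
        pvPS_succ tokenized ti htilen
      have hred : pvLoopA original tokenized target oi ti cur =
          (if cur + original[oi].length = tokenized[ti].length then
            pvLoopA original tokenized target (oi + 1) (ti + 1) 0
          else
            pvLoopA original tokenized target (oi + 1) ti (cur + original[oi].length + 1)) := by
        rw [pvLoopA, if_pos hlt, hg1, hg2]
      rw [hred]
      by_cases hmatch : cur + original[oi].length = tokenized[ti].length
      · rw [if_pos hmatch]
        have hfin : (if ((ti : Int) + 1) < target then target.toNat else ti + 1) =
            (if (ti : Int) < target then target.toNat else ti) := by
          simp only [if_pos hlt]
          split_ifs with h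
          · rfl
          · omega
        have hnext' : ((ti + 1 : Nat) : Int) < target →
            pvPS original (oi + 1) < pvPS tokenized (ti + 1 + 1) := by
          intro h
          have h2 : ti + 1 < tokenized.length := by
            have : ((ti : Int) + 1) < target := by push_cast at h ⊢; omega
            omega
          have := pvPS_succ tokenized (ti + 1) h2
          omega
        obtain ⟨oi', heq, hle, hP⟩ := ih (oi + 1) (ti + 1) 0 (by omega) (by omega)
          (by omega) (by omega) (Or.inr rfl) hnext'
        refine ⟨oi', ?_, hle, ?_⟩
        · rw [heq]
          push_cast at hfin ⊢
          rw [hfin]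
        · push_cast at hP ⊢
          rw [hfin] at hP
          exact hP
      · rw [if_neg hmatch]
        have hne : pvPS original (oi + 1) ≠ pvPS tokenized (ti + 1) := by omega
        have hlt2 : pvPS original (oi + 1) < pvPS tokenized (ti + 1) := by
          have h1 : oi + 1 ≤ c := by omega
          have := pvPS_mono original h1
          omega
        obtain ⟨oi', heq, hle, hP⟩ := ih (oi + 1) ti (cur + original[oi].length + 1) (by omega)
          (by omega) (by omega) (by omega) (Or.inl hlt) (fun _ => hlt2)
        exact ⟨oi', heq, hle, hP⟩
    · refine ⟨oi, ?_, hoi, ?_⟩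
      · rw [pvLoopA, if_neg hlt]
        have hcur0 : cur = 0 := by tauto
        simp [hlt, hcur0]
      · simp only [if_neg hlt]; omega

-- the dictionary B builds: total = |'_'.join(original)|+1 slot, items = all boundary pairs in order
theorem pvPS_append (xs : List String) (w : String) {c : Nat} (hc : c ≤ xs.length) :
    pvPS (xs ++ [w]) c = pvPS xs c := by
  simp [pvPS, List.take_append_of_le_length hc]

theorem pvPosDict_spec (original : List String) :
    (pvPosDict original).1 = (pvPS original original.length : Int) ∧
    (pvPosDict original).2.items =
      (List.range (original.length + 1)).map (fun c => ((pvPS original c : Int), (c : Int))) := by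
  induction original using List.reverseRecOn with
  | nil => simp [pvPosDict, pvPS, PySem.Dict.ofList, PySem.Dict.empty, PySem.Dict.insert,
      PySem.List.enumerate, List.range_succ, PySem.Dict.update]
  | append_singleton xs w ih =>
    obtain ⟨ih1, ih2⟩ := ih
    have hkeys : (pvPosDict xs).2.keys =
        (List.range (xs.length + 1)).map (fun c => ((pvPS xs c : Int))) := by
      show (pvPosDict xs).2.items.map (·.1) = _
      rw [ih2, List.map_map]
      rfl
    have hstep : pvPosDict (xs ++ [w]) =
        ((pvPosDict xs).1 + (w.length : Int) + 1,
         (pvPosDict xs).2.insert ((pvPosDict xs).1 + (w.length : Int) + 1) ((xs.length : Int) + 1)) := by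
      simp [pvPosDict, PySem.List.enumerate_append, PySem.List.enumerate_cons,
        PySem.List.enumerate_nil, List.foldl_append]
    have hPnew : pvPS (xs ++ [w]) (xs.length + 1) = pvPS xs xs.length + (w.length + 1) := by
      have h := pvPS_succ (xs ++ [w]) xs.length (by simp)
      rw [pvPS_append xs w (le_refl _)] at h
      simpa using h
    have hfresh : (pvPosDict xs).2.contains ((pvPosDict xs).1 + (w.length : Int) + 1) = false := by
      rw [PySem.Dict.contains_eq_decide_mem_keys, hkeys, ih1]
      simp only [decide_eq_false_iff_not, List.mem_map, List.mem_range]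
      rintro ⟨c, hc, hce⟩
      have hle : pvPS xs c ≤ pvPS xs xs.length := pvPS_mono xs (by omega)
      omega
    constructor
    · rw [hstep, ih1]
      simp only [List.length_append, List.length_cons, List.length_nil]
      rw [show xs.length + (1 + 0) = xs.length + 1 by omega, hPnew]
      push_cast
      ring
    · rw [hstep]
      simp only
      rw [PySem.Dict.items_insert_of_not_contains _ _ hfresh, ih2, ih1]
      simp only [List.length_append, List.length_cons, List.length_nil]
      rw [show xs.length + (1 + 0) = xs.length + 1 by omega]
      rw [show List.range (xs.length + 1 + 1) = List.range (xs.length + 1) ++ [xs.length + 1]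
        from List.range_succ, List.map_append]
      congr 1
      · apply List.map_congr_left
        intro c hc
        rw [List.mem_range] at hc
        rw [pvPS_append xs w (by omega)]
      · simp only [List.map_cons, List.map_nil]
        rw [hPnew]
        push_cast
        ring_nf

theorem pvSumCast (l : List String) :
    (l.map (fun w => (w.length : Int) + 1)).sum = (((l.map (fun s => s.length + 1)).sum : Nat) : Int) := by
  induction l with
  | nil => simp
  | cons a l ih => simp [ih]

theorem pvCutB_q (tokenized : List String) (tgt : Int)
    (h : tgt = 0 ∨ tgt + tokenized.length ≤ 0 ∨ 0 ≤ tgt) :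
    ((PySem.List.slice tokenized none (some tgt)).map (fun w => (w.length : Int) + 1)).sum =
      (pvPS tokenized tgt.toNat : Int) := by
  by_cases hn : 0 ≤ tgt
  · rw [PySem.List.slice_to _ hn]
    simpa [pvPS] using pvSumCast (tokenized.take tgt.toNat)
  · -- tgt ≤ -len : the slice is empty and tgt.toNat = 0
    have hk : tgt = -(((-tgt).toNat : Nat) : Int) := by omega
    have hlen : tokenized.length - (-tgt).toNat = 0 := by omega
    have hsl : PySem.List.slice tokenized none (some tgt) = ([] : List String) := by
      rw [hk, PySem.List.slice_to_neg_natCast _ _ (by omega), hlen, List.take_zero]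
    have htn : tgt.toNat = 0 := by omega
    rw [hsl, htn]
    simp [pvPS]

theorem pvPosDict_get (original : List String) {q : Nat} {c : Nat} (hc : c ≤ original.length)
    (hPc : pvPS original c = q) :
    (pvPosDict original).2.get? ((q : Nat) : Int) = some ((c : Nat) : Int) := by
  obtain ⟨-, hitems⟩ := pvPosDict_spec original
  have hkeys : (pvPosDict original).2.keys =
      (List.range (original.length + 1)).map (fun c => ((pvPS original c : Int))) := by
    show (pvPosDict original).2.items.map (·.1) = _
    rw [hitems, List.map_map]
    rfl
  have hnodup : (pvPosDict original).2.keys.Nodup := by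
    rw [hkeys]
    refine List.Nodup.map_on ?_ List.nodup_range
    intro a ha b hb hfe
    rw [List.mem_range] at ha hb
    exact pvPS_inj original (by omega) (by omega) (by exact_mod_cast hfe)
  apply PySem.Dict.get?_of_mem_items _ ?_ hnodup
  rw [hitems]
  apply List.mem_map.mpr
  exact ⟨c, List.mem_range.mpr (by omega), by rw [hPc]⟩

theorem mapToOriginalIndex_spec : Claim_equal_mapToOriginalIndex := by
  unfold Claim_equal_mapToOriginalIndex
  intro index original tokenized hDom hPre
  unfold Spec_mapToOriginalIndex
  by_cases hI : index = (-1, -1)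
  · simp [mapToOriginalIndex, mapToOriginalIndex_alt, hI]
  · obtain ⟨hC1, hC2, hTm, hex⟩ := hPre.resolve_left hI
    set T := index.2.toNat with hT
    set t1 := index.1.toNat with ht1def
    have hPS0o : pvPS original 0 = 0 := by simp [pvPS]
    have hPS0t : pvPS tokenized 0 = 0 := by simp [pvPS]
    -- A's first loop
    obtain ⟨oi1, heq1, hle1, hP1⟩ := pvLoopA_spec original tokenized index.1 T (by omega) hTm hex
      original.length 0 0 0 (by omega) (by omega) (by omega) (by omega) (Or.inr rfl)
      (by
        intro h
        have h1T : 1 ≤ T := by omega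
        have hs := pvPS_succ tokenized 0 (by omega)
        omega)
    simp only [Nat.cast_zero] at heq1 hP1
    have hif1 : (if (0:Int) < index.1 then index.1.toNat else 0) = t1 := by
      split_ifs with h <;> omega
    rw [hif1] at heq1 hP1
    -- A's second loop
    obtain ⟨oi2, heq2, hle2, hP2⟩ := pvLoopA_spec original tokenized index.2 T (by omega) hTm hex
      original.length oi1 t1 0 (by omega) (by omega) (by omega) hle1 (Or.inr rfl)
      (by
        intro h
        have h1T : t1 + 1 ≤ T := by omega
        have hs := pvPS_succ tokenized t1 (by omega)
        omega)
    have hif2 : (if (t1 : Int) < index.2 then index.2.toNat else t1) = T := by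
      split_ifs with h <;> omega
    rw [hif2] at heq2 hP2
    have hA : mapToOriginalIndex index original tokenized = ((oi1 : Int), (oi2 : Int)) := by
      rw [mapToOriginalIndex, if_neg hI, heq1]
      simp only [heq2]
    -- B's two lookups
    have hc1 : pvCutB (pvPosDict original).2 tokenized index.1 = some ((oi1 : Int)) := by
      unfold pvCutB
      rw [pvCutB_q tokenized _ (by omega)]
      exact pvPosDict_get original hle1 hP1
    have hc2 : pvCutB (pvPosDict original).2 tokenized index.2 = some ((oi2 : Int)) := by
      unfold pvCutB
      rw [pvCutB_q tokenized _ (by omega)]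
      exact pvPosDict_get original hle2 hP2
    have hB : mapToOriginalIndex_alt index original tokenized = ((oi1 : Int), (oi2 : Int)) := by
      unfold mapToOriginalIndex_alt
      rw [if_neg hI]
      simp only [hc1, hc2]
    rw [hA, hB]
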